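-- pv_equiv track=rewrite | github.com/PopovIV/TSPTW | src/utils.py | closest_neighbor_by_close_time
-- ===== SOURCE A (Python) =====
-- def closest_neighbor_by_close_time(closeTime):
--     res = list()  # list of indexies
--     N = len(closeTime)  # number of cities
--
--     res.append(0)  # add first city manually
--     for i in range(N):
--         newIndex = 0
--         smallestCost = float('inf')
--         for j in range(N):
--             if (j not in res and closeTime[j] < smallestCost):
--                 newIndex = j
--                 smallestCost = closeTime[j]
--         res.append(newIndex)
--
--     return res
-- ===== SOURCE B (Python) =====
-- def closest_neighbor_by_close_time(closeTime):
--     N = len(closeTime)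
--     order = sorted(range(1, N), key=lambda j: (closeTime[j], j))
--     return [0] + order + [0]
-- ===== Notes on version B (the rewrite author's own statement) =====
-- stated objective: faster
-- what changed: A repeatedly rescans all indices (testing membership in the growing result list) to pick the not-yet-chosen city with the smallest close time; B sorts the indices 1..N-1 once by (closeTime[j], j) and wraps the sorted order with the starting city 0 on both ends.
-- outside the precondition, e.g. on closest_neighbor_by_close_time([]): A returns [0], B returns [0, 0]
import Mathlib
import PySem

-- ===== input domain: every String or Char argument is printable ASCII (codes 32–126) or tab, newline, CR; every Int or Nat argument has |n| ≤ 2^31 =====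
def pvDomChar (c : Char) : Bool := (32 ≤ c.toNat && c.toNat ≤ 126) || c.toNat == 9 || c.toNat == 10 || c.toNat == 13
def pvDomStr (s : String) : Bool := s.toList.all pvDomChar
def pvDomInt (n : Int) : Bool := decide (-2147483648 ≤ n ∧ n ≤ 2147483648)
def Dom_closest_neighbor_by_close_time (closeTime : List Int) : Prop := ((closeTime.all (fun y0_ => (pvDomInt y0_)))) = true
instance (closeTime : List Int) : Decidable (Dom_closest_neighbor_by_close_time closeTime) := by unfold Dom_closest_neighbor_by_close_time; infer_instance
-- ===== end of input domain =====

-- B replaces A's O(N^3) repeated linear-scan selection (argmin over indices not yet chosen,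
-- re-scanned against a growing result list) by one stable sort of the indices 1..N-1 on
-- (closeTime[j], j), with 0 prepended and appended; equivalence is proved on Pre_ below.

-- ===== PORT A =====
-- helper: the body of A's inner loop ('j not in res and closeTime[j] < smallestCost');
-- smallestCost = float('inf') is modelled as `none` (none.all _ = true, i.e. anything < inf)
def pvStep (f : Int → Int) (p : Int → Bool) (st : Int × Option Int) (j : Int) : Int × Option Int :=
  if p j && st.2.all (fun sc => decide (f j < sc)) then (j, some (f j)) else st

def closest_neighbor_by_close_time (closeTime : List Int) : List Int :=
  (PySem.List.pyRange 0 (PySem.List.len closeTime) 1).foldl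
    (fun res _i =>
      res ++ [((PySem.List.pyRange 0 (PySem.List.len closeTime) 1).foldl
        (pvStep (fun j => PySem.List.pyGetD closeTime j 0) (fun j => decide (j ∉ res)))
        ((0 : Int), (none : Option Int))).1])
    [(0 : Int)]

-- ===== PORT B =====
def closest_neighbor_by_close_time_alt (closeTime : List Int) : List Int :=
  [0] ++ PySem.List.sorted2 (PySem.List.pyRange 1 (PySem.List.len closeTime) 1)
    (fun j => PySem.List.pyGetD closeTime j 0) (fun j => j) ++ [0]

-- ===== PRECONDITION & SPEC =====
-- Pre_ excludes only the empty list, a defensible corner: there A's loop body never runs, so A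
-- returns the start index once while B returns it twice; neither is specified for zero cities.
def Pre_closest_neighbor_by_close_time (closeTime : List Int) : Prop := closeTime ≠ []
instance (closeTime : List Int) : Decidable (Pre_closest_neighbor_by_close_time closeTime) := by
  unfold Pre_closest_neighbor_by_close_time; infer_instance
def pvWitness_closest_neighbor_by_close_time : List Int := [5, 3]

def Spec_closest_neighbor_by_close_time (closeTime : List Int) (out : List Int) : Prop := out = closest_neighbor_by_close_time_alt closeTime
instance (closeTime : List Int) (out : List Int) : Decidable (Spec_closest_neighbor_by_close_time closeTime out) := by unfold Spec_closest_neighbor_by_close_time; infer_instance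


-- ===== CLAIM (what is proved, stated in full; the proofs are below) =====
def Claim_equal_closest_neighbor_by_close_time : Prop := ∀ (closeTime : List Int), Dom_closest_neighbor_by_close_time closeTime → Pre_closest_neighbor_by_close_time closeTime → Spec_closest_neighbor_by_close_time closeTime (closest_neighbor_by_close_time closeTime)

-- ===== LEMMAS AND PROOFS =====

def pvKeyLE (f : Int → Int) (a b : Int) : Prop := f a < f b ∨ (f a = f b ∧ a ≤ b)

def pvBf (f : Int → Int) (a b : Int) : Bool :=
  decide (f a < f b) || (!decide (f b < f a) && decide (a < b))

lemma pvBf_true (f : Int → Int) (a b : Int) : pvBf f a b = true ↔ (f a < f b ∨ (¬ f b < f a ∧ a < b)) := by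
  simp [pvBf]

lemma pvBf_false (f : Int → Int) (a b : Int) : pvBf f a b = false ↔ (¬ f a < f b ∧ (f b < f a ∨ ¬ a < b)) := by
  simp [pvBf]; omega

lemma pvInsert_pairwise (f : Int → Int) (x : Int) (ys : List Int)
    (h : ys.Pairwise (fun a b => pvBf f b a = false)) :
    (PySem.List.insertBy (pvBf f) x ys).Pairwise (fun a b => pvBf f b a = false) := by
  induction ys with
  | nil => simp [PySem.List.insertBy]
  | cons y ys ih =>
    rcases List.pairwise_cons.mp h with ⟨hy, hys⟩
    by_cases hxy : pvBf f x y = true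
    · simp only [PySem.List.insertBy, hxy, if_pos]
      refine List.pairwise_cons.mpr ⟨?_, h⟩
      intro z hz
      rcases List.mem_cons.mp hz with rfl | hz'
      · rw [pvBf_true] at hxy; rw [pvBf_false]; omega
      · have hyz := hy z hz'
        rw [pvBf_true] at hxy; rw [pvBf_false] at hyz ⊢; omega
    · have hxy' : pvBf f x y = false := by revert hxy; cases pvBf f x y <;> simp
      simp only [PySem.List.insertBy, hxy', Bool.false_eq_true, if_false]
      refine List.pairwise_cons.mpr ⟨?_, ih hys⟩
      intro z hz
      rcases (PySem.List.insertBy_mem_iff _ _ _ _).mp hz with rfl | hz'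
      · exact hxy'
      · exact hy z hz'

lemma pvFoldl_pairwise (f : Int → Int) (xs : List Int) :
    ∀ (acc : List Int), acc.Pairwise (fun a b => pvBf f b a = false) →
      (xs.foldl (fun acc x => PySem.List.insertBy (pvBf f) x acc) acc).Pairwise
        (fun a b => pvBf f b a = false) := by
  induction xs with
  | nil => intro acc h; simpa using h
  | cons x xs ih =>
    intro acc h
    exact ih _ (pvInsert_pairwise f x acc h)

lemma pvSorted2_eq (f : Int → Int) (xs : List Int) :
    PySem.List.sorted2 xs f (fun j => j) false
      = xs.foldl (fun acc x => PySem.List.insertBy (pvBf f) x acc) [] := rfl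

lemma pvSorted2_pairwise (f : Int → Int) (xs : List Int) :
    (PySem.List.sorted2 xs f (fun j => j) false).Pairwise (pvKeyLE f) := by
  rw [pvSorted2_eq]
  refine (pvFoldl_pairwise f xs [] (by simp)).imp ?_
  intro a b h
  rw [pvBf_false] at h; unfold pvKeyLE; omega

lemma pvInnerGo (f : Int → Int) (p : Int → Bool) :
    ∀ (L : List Int) (st : Int × Option Int),
      L.Pairwise (fun a b => a < b) →
      (st = (0, none) ∨ ∃ m0, p m0 = true ∧ st = (m0, some (f m0)) ∧ ∀ j ∈ L, m0 < j) →
      (L.foldl (pvStep f p) st = st ∧ ∀ j ∈ L, p j = false) ∨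
      (∃ m, p m = true ∧
        L.foldl (pvStep f p) st = (m, some (f m)) ∧
        (st = (m, some (f m)) ∨ m ∈ L) ∧
        (∀ m0 : Int, st = (m0, some (f m0)) → pvKeyLE f m m0) ∧
        (∀ j ∈ L, p j = true → pvKeyLE f m j)) := by
  intro L
  induction L with
  | nil => intro st _ _; left; simp
  | cons a L ih =>
    intro st hpw hst
    rcases List.pairwise_cons.mp hpw with ⟨ha, hL⟩
    rcases hst with rfl | ⟨m0, hpm0, rfl, hm0lt⟩
    · -- st = (0, none)
      by_cases hpa : p a = true
      · -- takes a
        have hstep : pvStep f p (0, none) a = (a, some (f a)) := by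
          simp [pvStep, hpa]
        rw [List.foldl_cons, hstep]
        rcases ih (a, some (f a)) hL (Or.inr ⟨a, hpa, rfl, ha⟩) with ⟨heq, hall⟩ | hR
        · right
          refine ⟨a, hpa, heq, Or.inr (List.mem_cons_self), ?_, ?_⟩
          · intro m0 h0; cases h0
          · intro j hj hpj
            rcases List.mem_cons.mp hj with rfl | hj'
            · unfold pvKeyLE; omega
            · rw [hall j hj'] at hpj; cases hpj
        · rcases hR with ⟨m, hpm, hfold, hdisj, hstc, hmin⟩
          right
          refine ⟨m, hpm, hfold, ?_, ?_, ?_⟩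
          · rcases hdisj with heq | hm'
            · have : m = a := by injection heq with h1 h2; exact h1.symm ▸ rfl
              exact Or.inr (this ▸ List.mem_cons_self)
            · exact Or.inr (List.mem_cons_of_mem _ hm')
          · intro m0 h0; cases h0
          · intro j hj hpj
            rcases List.mem_cons.mp hj with rfl | hj'
            · exact hstc _ rfl
            · exact hmin j hj' hpj
      · -- skips a
        have hpa' : p a = false := by revert hpa; cases p a <;> simp
        have hstep : pvStep f p (0, none) a = (0, none) := by
          simp [pvStep, hpa']
        rw [List.foldl_cons, hstep]
        rcases ih (0, none) hL (Or.inl rfl) with ⟨heq, hall⟩ | hR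
        · left
          refine ⟨heq, ?_⟩
          intro j hj
          rcases List.mem_cons.mp hj with rfl | hj'
          · exact hpa'
          · exact hall j hj'
        · rcases hR with ⟨m, hpm, hfold, hdisj, hstc, hmin⟩
          right
          refine ⟨m, hpm, hfold, ?_, ?_, ?_⟩
          · rcases hdisj with heq | hm'
            · exact absurd heq (by simp)
            · exact Or.inr (List.mem_cons_of_mem _ hm')
          · intro m0 h0; cases h0
          · intro j hj hpj
            rcases List.mem_cons.mp hj with rfl | hj'
            · rw [hpa'] at hpj; cases hpj
            · exact hmin j hj' hpj
    · -- st = (m0, some (f m0))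
      by_cases hcond : p a = true ∧ f a < f m0
      · have hstep : pvStep f p (m0, some (f m0)) a = (a, some (f a)) := by
          simp [pvStep, hcond.1, hcond.2]
        rw [List.foldl_cons, hstep]
        rcases ih (a, some (f a)) hL (Or.inr ⟨a, hcond.1, rfl, ha⟩) with ⟨heq, hall⟩ | hR
        · right
          refine ⟨a, hcond.1, heq, Or.inr List.mem_cons_self, ?_, ?_⟩
          · intro m1 h1
            have : m1 = m0 := by injection h1 with h1a h1b; omega
            subst this
            unfold pvKeyLE; left; exact hcond.2
          · intro j hj hpj
            rcases List.mem_cons.mp hj with rfl | hj'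
            · unfold pvKeyLE; omega
            · rw [hall j hj'] at hpj; cases hpj
        · rcases hR with ⟨m, hpm, hfold, hdisj, hstc, hmin⟩
          right
          have hma : pvKeyLE f m a := hstc a rfl
          refine ⟨m, hpm, hfold, ?_, ?_, ?_⟩
          · rcases hdisj with heq | hm'
            · have : m = a := by injection heq with h1 _; exact h1.symm
              exact Or.inr (this ▸ List.mem_cons_self)
            · exact Or.inr (List.mem_cons_of_mem _ hm')
          · intro m1 h1
            have : m1 = m0 := by injection h1 with h1a h1b; omega
            subst this
            have := hcond.2
            unfold pvKeyLE at hma ⊢; omega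
          · intro j hj hpj
            rcases List.mem_cons.mp hj with rfl | hj'
            · exact hma
            · exact hmin j hj' hpj
      · -- keeps st
        have hstep : pvStep f p (m0, some (f m0)) a = (m0, some (f m0)) := by
          rcases Decidable.not_and_iff_not_or_not.mp hcond with h | h
          · have : p a = false := by revert h; cases p a <;> simp
            simp [pvStep, this]
          · simp [pvStep, h]
        rw [List.foldl_cons, hstep]
        have hm0a : p a = true → pvKeyLE f m0 a := by
          intro hpa
          have hfa : ¬ f a < f m0 := fun h => hcond ⟨hpa, h⟩
          have hlt := hm0lt a List.mem_cons_self
          unfold pvKeyLE; omega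
        rcases ih (m0, some (f m0)) hL (Or.inr ⟨m0, hpm0, rfl, fun j hj => hm0lt j (List.mem_cons_of_mem _ hj)⟩) with ⟨heq, hall⟩ | hR
        · right
          refine ⟨m0, hpm0, heq, Or.inl rfl, ?_, ?_⟩
          · intro m1 h1
            have : m1 = m0 := by injection h1 with h1a h1b; omega
            subst this; unfold pvKeyLE; omega
          · intro j hj hpj
            rcases List.mem_cons.mp hj with rfl | hj'
            · exact hm0a hpj
            · rw [hall j hj'] at hpj; cases hpj
        · rcases hR with ⟨m, hpm, hfold, hdisj, hstc, hmin⟩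
          right
          have hmm0 : pvKeyLE f m m0 := hstc m0 rfl
          refine ⟨m, hpm, hfold, ?_, ?_, ?_⟩
          · rcases hdisj with heq | hm'
            · exact Or.inl heq
            · exact Or.inr (List.mem_cons_of_mem _ hm')
          · intro m1 h1
            have : m1 = m0 := by injection h1 with h1a h1b; omega
            subst this; exact hmm0
          · intro j hj hpj
            rcases List.mem_cons.mp hj with rfl | hj'
            · have := hm0a hpj
              unfold pvKeyLE at hmm0 this ⊢; omega
            · exact hmin j hj' hpj

lemma pvKeyLE_refl (f : Int → Int) (a : Int) : pvKeyLE f a a := by unfold pvKeyLE; omega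

lemma pvSel (f : Int → Int) (N : Int) (s : List Int)
    (hperm : s.Perm (PySem.List.pyRange 1 N 1))
    (hpair : s.Pairwise (pvKeyLE f)) (hnd : s.Nodup)
    (k : Nat) (hk : k < s.length) :
    (PySem.List.pyRange 0 N 1).foldl
      (pvStep f (fun j => decide (j ∉ (0 :: s.take k)))) ((0 : Int), (none : Option Int))
      = (s[k], some (f s[k])) := by
  have hmem_s : ∀ x, x ∈ s ↔ (1 ≤ x ∧ x < N) := by
    intro x; rw [hperm.mem_iff, PySem.List.mem_pyRange_one]
  have hsk_s : s[k] ∈ s := List.getElem_mem hk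
  have hsk_rng : 1 ≤ s[k] ∧ s[k] < N := (hmem_s _).mp hsk_s
  have hskL : s[k] ∈ PySem.List.pyRange 0 N 1 :=
    PySem.List.mem_pyRange_one.mpr ⟨by omega, hsk_rng.2⟩
  have hnd2 : (s.take k ++ s.drop k).Nodup := by rw [List.take_append_drop]; exact hnd
  have hdisjoint := (List.nodup_append.mp hnd2).2.2
  have hsk_drop : s[k] ∈ s.drop k := by
    rw [List.drop_eq_getElem_cons hk]; exact List.mem_cons_self
  have hsk_take : s[k] ∉ s.take k := fun h => hdisjoint _ h _ hsk_drop rfl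
  have hp_sk : decide (s[k] ∉ (0 :: s.take k)) = true := by
    simp only [decide_eq_true_eq, List.mem_cons]
    rintro (h0 | h1)
    · omega
    · exact hsk_take h1
  rcases pvInnerGo f (fun j => decide (j ∉ (0 :: s.take k)))
      (PySem.List.pyRange 0 N 1) ((0 : Int), (none : Option Int))
      (PySem.List.pairwise_lt_pyRange_one 0 N) (Or.inl rfl) with ⟨_, hall⟩ | hR
  · replace hall : decide (s[k] ∉ (0 :: s.take k)) = false := hall s[k] hskL
    rw [hall] at hp_sk; cases hp_sk
  · rcases hR with ⟨m, hpm, hfold, hdisj, _, hmin⟩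
    have hmL : m ∈ PySem.List.pyRange 0 N 1 := by
      rcases hdisj with heq | h
      · exact absurd heq (by simp)
      · exact h
    have hm_rng : 0 ≤ m ∧ m < N := by
      have := PySem.List.mem_pyRange_one.mp hmL; exact ⟨this.1, this.2⟩
    replace hpm : decide (m ∉ (0 :: s.take k)) = true := hpm
    simp only [decide_eq_true_eq, List.mem_cons] at hpm
    have hpm1 : m ≠ 0 := fun h => hpm (Or.inl h)
    have hpm2 : m ∉ s.take k := fun h => hpm (Or.inr h)
    have hm0 : (0:Int) < m := by omega
    have hm_s : m ∈ s := (hmem_s _).mpr ⟨by omega, hm_rng.2⟩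
    have hm_drop : m ∈ s.drop k := by
      rcases List.mem_append.mp (by rw [List.take_append_drop]; exact hm_s :
          m ∈ s.take k ++ s.drop k) with h | h
      · exact absurd h hpm2
      · exact h
    have hle1 : pvKeyLE f s[k] m := by
      have hdp := hpair.drop (i := k)
      rw [List.drop_eq_getElem_cons hk] at hdp
      rcases List.pairwise_cons.mp hdp with ⟨hhead, _⟩
      rw [List.drop_eq_getElem_cons hk] at hm_drop
      rcases List.mem_cons.mp hm_drop with rfl | h
      · exact pvKeyLE_refl f _
      · exact hhead m h
    have hle2 : pvKeyLE f m s[k] := hmin s[k] hskL hp_sk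
    have hms : m = s[k] := by unfold pvKeyLE at hle1 hle2; omega
    rw [hfold, hms]

lemma pvSelFull (f : Int → Int) (N : Int) (s : List Int)
    (hperm : s.Perm (PySem.List.pyRange 1 N 1)) :
    (PySem.List.pyRange 0 N 1).foldl
      (pvStep f (fun j => decide (j ∉ (0 :: s)))) ((0 : Int), (none : Option Int))
      = ((0 : Int), (none : Option Int)) := by
  have hall : ∀ j ∈ PySem.List.pyRange 0 N 1, decide (j ∉ (0 :: s)) = false := by
    intro j hj
    have hj' := PySem.List.mem_pyRange_one.mp hj
    by_cases hj0 : j = 0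
    · simp [hj0]
    · have hjs : j ∈ s := hperm.mem_iff.mpr (PySem.List.mem_pyRange_one.mpr
        ⟨by omega, hj'.2⟩)
      simp [hjs]
  rcases pvInnerGo f (fun j => decide (j ∉ (0 :: s)))
      (PySem.List.pyRange 0 N 1) ((0 : Int), (none : Option Int))
      (PySem.List.pairwise_lt_pyRange_one 0 N) (Or.inl rfl) with ⟨heq, _⟩ | hR
  · exact heq
  · rcases hR with ⟨m, hpm, _, hdisj, _, _⟩
    have hmL : m ∈ PySem.List.pyRange 0 N 1 := by
      rcases hdisj with heq | h
      · exact absurd heq (by simp)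
      · exact h
    replace hpm : decide (m ∉ (0 :: s)) = true := hpm
    rw [hall m hmL] at hpm; cases hpm

lemma pvOuter (f : Int → Int) (N : Int) (s : List Int)
    (hperm : s.Perm (PySem.List.pyRange 1 N 1))
    (hpair : s.Pairwise (pvKeyLE f)) (hnd : s.Nodup) :
    ∀ (k : Nat), k ≤ s.length →
    (PySem.List.pyRange 0 (k : Int) 1).foldl
      (fun res _i =>
        res ++ [((PySem.List.pyRange 0 N 1).foldl
          (pvStep f (fun j => decide (j ∉ res)))
          ((0 : Int), (none : Option Int))).1])
      [(0 : Int)]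
      = 0 :: s.take k := by
  intro k
  induction k with
  | zero =>
    intro _
    have h0 : PySem.List.pyRange 0 ((0 : Nat) : Int) 1 = [] :=
      PySem.List.pyRange_one_eq_nil (by omega)
    rw [h0]; simp
  | succ k ih =>
    intro hk
    have hk' : k < s.length := by omega
    have hcast : ((k + 1 : Nat) : Int) = (k : Int) + 1 := by omega
    have hsr := PySem.List.pyRange_one_succ_right (a := 0) (b := (k : Int)) (by omega)
    rw [hcast, hsr, List.foldl_append, ih (by omega)]
    simp only [List.foldl_cons, List.foldl_nil]
    rw [pvSel f N s hperm hpair hnd k hk']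
    rw [List.take_add_one, List.getElem?_eq_getElem hk']
    simp

lemma pvMain (c : List Int) (hc : c ≠ []) :
    closest_neighbor_by_close_time c = closest_neighbor_by_close_time_alt c := by
  unfold closest_neighbor_by_close_time closest_neighbor_by_close_time_alt
  rw [PySem.List.len_eq]
  generalize hf : (fun j => PySem.List.pyGetD c j 0) = f
  generalize hN : ((c.length : Nat) : Int) = N
  generalize hs : PySem.List.sorted2 (PySem.List.pyRange 1 N 1) f (fun j => j) false = s
  have hperm : s.Perm (PySem.List.pyRange 1 N 1) := hs ▸ PySem.List.sorted2_perm _ _ _ _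
  have hpair : s.Pairwise (pvKeyLE f) := hs ▸ pvSorted2_pairwise f _
  have hnd : s.Nodup := hperm.symm.nodup (PySem.List.nodup_pyRange_one 1 N)
  have hlen : s.length = (N - 1).toNat := hperm.length_eq.trans (PySem.List.length_pyRange_one 1 N)
  have hpos : 0 < c.length := by cases c with | nil => exact absurd rfl hc | cons a t => simp
  have hN' : N = (c.length : Int) := hN.symm
  have hNs : N = (s.length : Int) + 1 := by omega
  have hsplit : PySem.List.pyRange 0 N 1
      = PySem.List.pyRange 0 ((s.length : Int)) 1 ++ [(s.length : Int)] := by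
    rw [hNs]; exact PySem.List.pyRange_one_succ_right (a := 0) (b := (s.length : Int)) (by omega)
  generalize hg : (fun (res : List Int) (_i : Int) =>
      res ++ [((PySem.List.pyRange 0 N 1).foldl
        (pvStep f (fun j => decide (j ∉ res)))
        ((0 : Int), (none : Option Int))).1]) = g
  rw [hsplit, List.foldl_append, ← hg,
    pvOuter f N s hperm hpair hnd s.length (Nat.le_refl _)]
  simp only [List.foldl_cons, List.foldl_nil, List.take_length]
  rw [pvSelFull f N s hperm]
  simp

-- ===== VERDICT (by name: the statement is the Claim_ definition above) =====
theorem closest_neighbor_by_close_time_spec : Claim_equal_closest_neighbor_by_close_time := by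
  intro closeTime _ hpre
  unfold Spec_closest_neighbor_by_close_time
  exact pvMain closeTime hpre
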